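-- pv_equiv track=rewrite | github.com/roccolr/ASD | common_patterns/dynamic_programming/ferry_boats.py | ferry_boat
-- ===== SOURCE A (Python) =====
-- from math import inf
--
-- def ferry_boat(schedule:list, m:int, t:int, n:int):
--     dp = []
--     trips = []
--
--     for _ in range(m+1):
--         dp.append(0)
--         trips.append(0)
--
--     dp[0] = 0
--     trips[0] = 0
--
--     for i in range(1, m+1):
--         best_ready_time = inf
--         best_index = 0
--
--         for j in range(1, min(n,i)+1):
--             ready_time = dp[i-j]
--             if ready_time < best_ready_time:
--                 best_ready_time = ready_time
--                 best_index = j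
--
--         if best_ready_time >= schedule[i-1]:
--             dp[i] = best_ready_time + t
--             trips[i] = trips[i-best_index] + 1
--         else:
--             dp[i] = schedule[i-1] + t
--             trips[i] = trips[i-best_index] + 1
--
--     return dp[m], trips[m]
-- ===== SOURCE B (Python) =====
-- def ferry_boat(schedule, m, t, n):
--     # sliding-window minimum via a monotonic deque: each index is pushed and popped at most
--     # once, instead of A's per-step rescan of the last min(n, i) dp entries
--     dp = [0] * (m + 1)
--     trips = [0] * (m + 1)
--     dq = [0]   # indices into dp; dp strictly increasing front->back; among equal minima keeps the largest index
--     head = 0   # front pointer (amortized O(1) front pops)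
--     for i in range(1, m + 1):
--         lo = i - n if i - n > 0 else 0
--         while dq[head] < lo:
--             head += 1
--         k = dq[head]
--         ready = dp[k]
--         arrive = schedule[i - 1]
--         dp[i] = (ready if ready >= arrive else arrive) + t
--         trips[i] = trips[k] + 1
--         while len(dq) > head and dp[dq[-1]] >= dp[i]:
--             dq.pop()
--         dq.append(i)
--     return dp[m], trips[m]
-- ===== Notes on version B (the rewrite author's own statement) =====
-- stated objective: faster
-- what changed: Replaces A's inner rescan of the last min(n,i) dp entries at every step by a monotonic deque (with a front pointer) that maintains the sliding-window minimum and its largest attaining index, so each dp index is pushed and popped at most once.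
-- outside the precondition, e.g. on ferry_boat([5], 1, 2, 0): A returns (inf, 1), B raises IndexError
import Mathlib
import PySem

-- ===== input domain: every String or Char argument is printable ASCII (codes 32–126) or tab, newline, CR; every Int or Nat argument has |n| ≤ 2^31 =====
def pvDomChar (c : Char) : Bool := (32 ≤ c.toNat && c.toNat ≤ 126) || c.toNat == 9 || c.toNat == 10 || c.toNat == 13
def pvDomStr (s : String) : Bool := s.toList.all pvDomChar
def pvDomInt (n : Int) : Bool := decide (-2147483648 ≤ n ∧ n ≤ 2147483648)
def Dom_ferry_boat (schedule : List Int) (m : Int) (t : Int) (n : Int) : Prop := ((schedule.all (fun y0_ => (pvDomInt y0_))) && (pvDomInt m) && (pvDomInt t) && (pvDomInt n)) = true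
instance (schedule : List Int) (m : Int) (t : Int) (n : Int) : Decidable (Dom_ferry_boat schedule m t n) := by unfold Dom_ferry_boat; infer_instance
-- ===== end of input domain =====

-- B replaces A's per-step inner rescan of the dp window by a monotonic deque maintaining the
-- sliding-window minimum (each dp index is pushed and popped at most once); equal on Pre_.

-- ===== PORT A =====

-- 'for _ in range(m+1): dp.append(0)'
def ferryA_zeros (m : Int) : List Int :=
  (PySem.List.pyRange 0 (m + 1) 1).foldl (fun acc _ => acc ++ [(0 : Int)]) []

-- inner loop body: 'ready_time = dp[i-j]; if ready_time < best_ready_time: …'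
-- best_ready_time = inf is represented as 'none' (every int is < inf).
def ferryA_scan (dp : List Int) (i : Int) (st : Option Int × Int) (j : Int) : Option Int × Int :=
  let ready := PySem.List.pyGetD dp (i - j) 0
  match st.1 with
  | none => (some ready, j)
  | some best => if ready < best then (some ready, j) else st

-- one iteration of A's outer loop
def ferryA_step (schedule : List Int) (t : Int) (n : Int)
    (st : List Int × List Int) (i : Int) : List Int × List Int :=
  let dp := st.1
  let trips := st.2
  let best := (PySem.List.pyRange 1 (min n i + 1) 1).foldl (ferryA_scan dp i) (none, 0)
  let sched := PySem.List.pyGetD schedule (i - 1) 0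
  let newTrips := PySem.List.pySetD trips i (PySem.List.pyGetD trips (i - best.2) 0 + 1)
  match best.1 with
  | none => (PySem.List.pySetD dp i (sched + t), newTrips)
      -- inner loop empty: Python's dp[i] = inf + t is no int; these inputs are outside Pre_
  | some b =>
      if sched ≤ b then (PySem.List.pySetD dp i (b + t), newTrips)
      else (PySem.List.pySetD dp i (sched + t), newTrips)

def ferry_boat (schedule : List Int) (m : Int) (t : Int) (n : Int) : Int × Int :=
  let dp0 := PySem.List.pySetD (ferryA_zeros m) 0 0
  let trips0 := PySem.List.pySetD (ferryA_zeros m) 0 0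
  let fin := (PySem.List.pyRange 1 (m + 1) 1).foldl (ferryA_step schedule t n) (dp0, trips0)
  (PySem.List.pyGetD fin.1 m 0, PySem.List.pyGetD fin.2 m 0)

-- ===== PORT B =====

-- 'while dq[head] < lo: head += 1'  (guard head < len makes the recursion total; Python raises past the end, outside Pre_)
def ferryB_popFront (dq : List Int) (head : Nat) (lo : Int) : Nat :=
  if h : head < dq.length then
    if PySem.List.pyGetD dq (head : Int) 0 < lo then ferryB_popFront dq (head + 1) lo else head
  else head
termination_by dq.length - head

-- 'while len(dq) > head and dp[dq[-1]] >= dp[i]: dq.pop()'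
def ferryB_popBack (dp : List Int) (dq : List Int) (head : Nat) (v : Int) : List Int :=
  if _h : head < dq.length ∧ v ≤ PySem.List.pyGetD dp (PySem.List.pyGetD dq (-1) 0) 0 then
    ferryB_popBack dp dq.dropLast head v
  else dq
termination_by dq.length
decreasing_by simp [List.length_dropLast]; omega

-- one iteration of B's loop; state = (dp, trips, dq, head)
def ferryB_step (schedule : List Int) (t : Int) (n : Int)
    (st : List Int × List Int × List Int × Nat) (i : Int) :
    List Int × List Int × List Int × Nat :=
  let dp := st.1
  let trips := st.2.1
  let dq := st.2.2.1
  let head := st.2.2.2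
  let lo := if i - n > 0 then i - n else 0
  let head := ferryB_popFront dq head lo
  let k := PySem.List.pyGetD dq (head : Int) 0
  let ready := PySem.List.pyGetD dp k 0
  let arrive := PySem.List.pyGetD schedule (i - 1) 0
  let dp := PySem.List.pySetD dp i ((if arrive ≤ ready then ready else arrive) + t)
  let trips := PySem.List.pySetD trips i (PySem.List.pyGetD trips k 0 + 1)
  let dq := ferryB_popBack dp dq head (PySem.List.pyGetD dp i 0)
  (dp, trips, dq ++ [i], head)

def ferry_boat_alt (schedule : List Int) (m : Int) (t : Int) (n : Int) : Int × Int :=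
  let dp0 := List.replicate (m + 1).toNat (0 : Int)
  let trips0 := List.replicate (m + 1).toNat (0 : Int)
  let fin := (PySem.List.pyRange 1 (m + 1) 1).foldl (ferryB_step schedule t n) (dp0, trips0, [0], 0)
  (PySem.List.pyGetD fin.1 m 0, PySem.List.pyGetD fin.2.1 m 0)

-- ===== PRECONDITION & SPEC =====
-- Pre_ excludes m < 0 and (for m ≥ 1) schedule shorter than m, where A raises IndexError, and
-- (for m ≥ 1) n < 1, where A's inner loop is empty and A returns the float inf (no int value).
def Pre_ferry_boat (schedule : List Int) (m : Int) (t : Int) (n : Int) : Prop :=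
  0 ≤ m ∧ (1 ≤ m → 1 ≤ n ∧ m ≤ (schedule.length : Int))
instance (schedule : List Int) (m : Int) (t : Int) (n : Int) : Decidable (Pre_ferry_boat schedule m t n) := by unfold Pre_ferry_boat; infer_instance

def pvWitness_ferry_boat : List Int × Int × Int × Int := ([3, 1, 4], 3, 2, 2)

def Spec_ferry_boat (schedule : List Int) (m : Int) (t : Int) (n : Int) (out : Int × Int) : Prop := out = ferry_boat_alt schedule m t n
instance (schedule : List Int) (m : Int) (t : Int) (n : Int) (out : Int × Int) : Decidable (Spec_ferry_boat schedule m t n out) := by unfold Spec_ferry_boat; infer_instance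

-- ===== CLAIM (what is proved, stated in full; the proofs are below) =====
def Claim_equal_ferry_boat : Prop := ∀ (schedule : List Int) (m : Int) (t : Int) (n : Int), Dom_ferry_boat schedule m t n → Pre_ferry_boat schedule m t n → Spec_ferry_boat schedule m t n (ferry_boat schedule m t n)

-- ===== LEMMAS AND PROOFS =====

-- dp[k] as both programs read it
def dpg (dp : List Int) (k : Int) : Int := PySem.List.pyGetD dp k 0

-- lower end of the window scanned at step i (= i - min(n,i) for 1 ≤ n ≤ ... )
def winLo (n i : Int) : Int := if i - n > 0 then i - n else 0

-- f is the largest index of [lo, i) attaining the minimal dp value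
def IsBest (dp : List Int) (lo i f : Int) : Prop :=
  lo ≤ f ∧ f < i ∧
  (∀ k, lo ≤ k → k < i → dpg dp f ≤ dpg dp k) ∧
  (∀ k, f < k → k < i → dpg dp f < dpg dp k)

-- deque contents after step i: exactly the window indices all of whose successors are strictly larger
def DqInv (dp : List Int) (n i : Int) (q : List Int) : Prop :=
  q.Pairwise (· < ·) ∧
  (∀ k ∈ q, winLo n i ≤ k ∧ k ≤ i) ∧
  (∀ k, winLo n i ≤ k → k ≤ i → (k ∈ q ↔ ∀ k', k < k' → k' ≤ i → dpg dp k < dpg dp k'))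

-- ---- arithmetic facts about winLo ----
lemma winLo_nonneg (n i : Int) : 0 ≤ winLo n i := by unfold winLo; split <;> omega

lemma winLo_le (n i : Int) (hn : 1 ≤ n) (hi : 0 ≤ i) : winLo n i ≤ i := by unfold winLo; split <;> omega

lemma winLo_mono (n i j : Int) (h : i ≤ j) : winLo n i ≤ winLo n j := by
  unfold winLo; split <;> split <;> omega

lemma winLo_pred (n i : Int) (hn : 1 ≤ n) (hi : 1 ≤ i) : winLo n i ≤ i - 1 := by
  unfold winLo; split <;> omega

lemma winLo_eq_sub_min (n i : Int) (_hn : 1 ≤ n) (_hi : 1 ≤ i) : i - min n i = winLo n i := by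
  unfold winLo; split <;> omega

-- ---- A's zero-filled list ----
lemma foldl_append_zero (l : List Int) (acc : List Int) :
    l.foldl (fun acc _ => acc ++ [(0 : Int)]) acc = acc ++ List.replicate l.length 0 := by
  induction l generalizing acc with
  | nil => simp
  | cons x xs ih => simp [List.foldl, ih, List.replicate_succ]

lemma ferryA_zeros_eq (M : Nat) : ferryA_zeros (M : Int) = List.replicate (M + 1) 0 := by
  unfold ferryA_zeros
  rw [foldl_append_zero, PySem.List.length_pyRange_one]
  have : ((M : Int) + 1 - 0).toNat = M + 1 := by omega
  rw [this, List.nil_append]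

-- ---- reading/writing dp through pySetD ----
lemma dpg_set (dp : List Int) (i : Nat) (hi : i < dp.length) (v : Int) (k : Int) (hk : 0 ≤ k) :
    dpg (PySem.List.pySetD dp (i : Int) v) k = if k = (i : Int) then v else dpg dp k := by
  obtain ⟨kn, rfl⟩ := Int.eq_ofNat_of_zero_le hk
  unfold dpg
  rw [PySem.List.pyGetD_pySetD_natCast dp i kn v 0 hi]
  by_cases h : kn = i <;> simp [h]

lemma dpg_set_self (dp : List Int) (i : Nat) (hi : i < dp.length) (v : Int) :
    dpg (PySem.List.pySetD dp (i : Int) v) (i : Int) = v := by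
  rw [dpg_set dp i hi v (i : Int) (by positivity)]
  simp

-- ---- popFront computes dropWhile (· < lo) on the active deque ----
lemma popFront_spec (dq : List Int) (lo : Int) :
    ∀ head : Nat, head ≤ dq.length →
      head ≤ ferryB_popFront dq head lo ∧ ferryB_popFront dq head lo ≤ dq.length ∧
      dq.drop (ferryB_popFront dq head lo) = (dq.drop head).dropWhile (fun x => decide (x < lo)) := by
  have main : ∀ fuel head, dq.length - head ≤ fuel → head ≤ dq.length →
      head ≤ ferryB_popFront dq head lo ∧ ferryB_popFront dq head lo ≤ dq.length ∧
      dq.drop (ferryB_popFront dq head lo) = (dq.drop head).dropWhile (fun x => decide (x < lo)) := by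
    intro fuel
    induction fuel with
    | zero =>
      intro head h1 h2
      have hhe : head = dq.length := by omega
      rw [ferryB_popFront, dif_neg (by omega)]
      refine ⟨le_refl _, h2, ?_⟩
      rw [List.drop_eq_nil_of_le (by omega)]
      rfl
    | succ f ih =>
      intro head h1 h2
      rw [ferryB_popFront]
      by_cases hh : head < dq.length
      · rw [dif_pos hh]
        have hget : PySem.List.pyGetD dq (head : Int) 0 = dq[head] := by
          rw [PySem.List.pyGetD_natCast, List.getD_eq_getElem dq 0 hh]
        rw [List.drop_eq_getElem_cons hh, List.dropWhile_cons]
        by_cases hlt : dq[head] < lo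
        · rw [hget, if_pos hlt, if_pos (by simpa using hlt)]
          obtain ⟨a, b, c⟩ := ih (head + 1) (by omega) (by omega)
          exact ⟨by omega, b, c⟩
        · rw [hget, if_neg hlt, if_neg (by simpa using hlt)]
          exact ⟨le_refl _, h2, List.drop_eq_getElem_cons hh⟩
      · rw [dif_neg hh]
        refine ⟨le_refl _, h2, ?_⟩
        rw [List.drop_eq_nil_of_le (by omega)]
        rfl
  intro head h
  exact main (dq.length - head) head (le_refl _) h

-- ---- popBack computes rdropWhile (v ≤ dp[·]) on the active deque ----
lemma popBack_spec (dp : List Int) (v : Int) :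
    ∀ dq : List Int, ∀ head : Nat, head ≤ dq.length →
      head ≤ (ferryB_popBack dp dq head v).length ∧
      (ferryB_popBack dp dq head v).drop head =
        (dq.drop head).rdropWhile (fun x => decide (v ≤ dpg dp x)) := by
  have main : ∀ fuel dq head, dq.length ≤ fuel → head ≤ dq.length →
      head ≤ (ferryB_popBack dp dq head v).length ∧
      (ferryB_popBack dp dq head v).drop head =
        (dq.drop head).rdropWhile (fun x => decide (v ≤ dpg dp x)) := by
    intro fuel
    induction fuel with
    | zero =>
      intro dq head h1 h2
      have : head = 0 ∧ dq.length = 0 := by omega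
      rw [ferryB_popBack, dif_neg (by omega)]
      refine ⟨h2, ?_⟩
      rw [List.drop_eq_nil_of_le (by omega)]
      rfl
    | succ f ih =>
      intro dq head h1 h2
      rw [ferryB_popBack]
      by_cases hh : head < dq.length
      · have hdqne : dq ≠ [] := by
          intro hcon; rw [hcon] at hh; simp at hh
        have hqne : dq.drop head ≠ [] := by
          intro hcon
          have := congrArg List.length hcon
          simp at this; omega
        have hlast : PySem.List.pyGetD dq (-1) 0 = (dq.drop head).getLast hqne := by
          rw [PySem.List.pyGetD_neg_one dq 0 hdqne, List.getLast_drop hqne]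
        have hsplit : (dq.drop head).dropLast ++ [(dq.drop head).getLast hqne] = dq.drop head :=
          List.dropLast_append_getLast hqne
        by_cases hv : v ≤ PySem.List.pyGetD dp (PySem.List.pyGetD dq (-1) 0) 0
        · rw [dif_pos ⟨hh, hv⟩]
          obtain ⟨a, b⟩ := ih dq.dropLast head (by simp [List.length_dropLast]; omega)
            (by simp [List.length_dropLast]; omega)
          refine ⟨a, ?_⟩
          rw [b]
          have hcomm : dq.dropLast.drop head = (dq.drop head).dropLast := by
            simp [List.dropLast_eq_take, List.drop_take, List.length_drop]
            omega
          rw [hcomm]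
          conv_rhs => rw [← hsplit]
          rw [List.rdropWhile_concat]
          rw [if_pos (by rw [← hlast]; simpa [dpg] using hv)]
        · rw [dif_neg (by intro hcon; exact hv hcon.2)]
          refine ⟨h2, ?_⟩
          conv_rhs => rw [← hsplit]
          rw [List.rdropWhile_concat, if_neg (by rw [← hlast]; simpa [dpg] using hv), hsplit]
      · rw [dif_neg (by intro hcon; exact hh hcon.1)]
        refine ⟨h2, ?_⟩
        rw [List.drop_eq_nil_of_le (by omega)]
        rfl
  intro dq head h
  exact main dq.length dq head (le_refl _) h

-- ---- membership in dropWhile/rdropWhile on a sorted list ----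
lemma mem_dropWhile_lt (l : List Int) (hl : l.Pairwise (· < ·)) (lo k : Int) :
    k ∈ l.dropWhile (fun x => decide (x < lo)) ↔ k ∈ l ∧ lo ≤ k := by
  induction l with
  | nil => simp
  | cons x xs ih =>
    have hx : ∀ y ∈ xs, x < y := by
      intro y hy; exact (List.pairwise_cons.mp hl).1 y hy
    have htl := ih (List.pairwise_cons.mp hl).2
    rw [List.dropWhile_cons]
    by_cases hlt : x < lo
    · rw [if_pos (by simpa using hlt), htl]
      constructor
      · rintro ⟨h1, h2⟩; exact ⟨List.mem_cons_of_mem _ h1, h2⟩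
      · rintro ⟨h1, h2⟩
        rcases List.mem_cons.mp h1 with rfl | h1
        · omega
        · exact ⟨h1, h2⟩
    · rw [if_neg (by simpa using hlt)]
      constructor
      · intro h1
        refine ⟨h1, ?_⟩
        rcases List.mem_cons.mp h1 with rfl | h1
        · omega
        · have := hx k h1; omega
      · exact fun h => h.1

lemma mem_rdropWhile_upclosed (l : List Int) (p : Int → Bool) (hl : l.Pairwise (· < ·))
    (hcl : ∀ a b, a ∈ l → b ∈ l → a < b → p a = true → p b = true) (k : Int) :
    k ∈ l.rdropWhile p ↔ k ∈ l ∧ p k = false := by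
  induction l using List.reverseRecOn with
  | nil => simp
  | append_singleton l x ih =>
    have hpl : l.Pairwise (· < ·) := hl.sublist (List.sublist_append_left l [x])
    have hlx : ∀ a ∈ l, a < x := by
      intro a ha
      exact (List.pairwise_append.mp hl).2.2 a ha x (List.mem_singleton_self x)
    have hcl' : ∀ a b, a ∈ l → b ∈ l → a < b → p a = true → p b = true := by
      intro a b ha hb
      exact hcl a b (List.mem_append_left _ ha) (List.mem_append_left _ hb)
    rw [List.rdropWhile_concat]
    by_cases hpx : p x = true
    · rw [if_pos hpx, ih hpl hcl']
      constructor
      · rintro ⟨h1, h2⟩; exact ⟨List.mem_append_left _ h1, h2⟩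
      · rintro ⟨h1, h2⟩
        rcases List.mem_append.mp h1 with h1 | h1
        · exact ⟨h1, h2⟩
        · rw [List.mem_singleton.mp h1] at h2; rw [h2] at hpx; exact absurd hpx (by simp)
    · rw [if_neg hpx]
      constructor
      · intro h1
        refine ⟨h1, ?_⟩
        rcases List.mem_append.mp h1 with h1 | h1
        · by_cases hpk : p k = true
          · exact absurd (hcl k x (List.mem_append_left _ h1) (List.mem_append_right _ (List.mem_singleton_self x)) (hlx k h1) hpk) (by simpa using hpx)
          · simpa using hpk
        · rw [List.mem_singleton.mp h1]; simpa using hpx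
      · exact fun h => h.1

-- ---- A's inner scan returns the window minimum together with the largest index attaining it ----
lemma scan_spec (dp : List Int) (i : Int) :
    ∀ J : Nat, 1 ≤ J →
      ∃ f, IsBest dp (i - J) i f ∧
        (PySem.List.pyRange 1 ((J : Int) + 1) 1).foldl (ferryA_scan dp i) (none, 0) =
          (some (dpg dp f), i - f) := by
  intro J hJ
  induction J, hJ using Nat.le_induction with
  | base =>
    refine ⟨i - 1, ⟨by omega, by omega, ?_, by omega⟩, ?_⟩
    · intro k h1 h2
      have hk : k = i - 1 := by omega
      rw [hk]
    · have h11 : ((1 : Nat) : Int) + 1 = 1 + 1 := by norm_num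
      rw [h11, PySem.List.pyRange_one_singleton]
      show ferryA_scan dp i (none, 0) 1 = _
      unfold ferryA_scan
      simp only [dpg, Prod.mk.injEq]
      exact ⟨trivial, by ring⟩
  | succ J hJ ih =>
    obtain ⟨f, ⟨hb1, hb2, hb3, hb4⟩, heq⟩ := ih
    have hcast : ((J + 1 : Nat) : Int) + 1 = ((J : Int) + 1) + 1 := by push_cast; ring
    rw [hcast, PySem.List.pyRange_one_succ_right (by omega), List.foldl_append]
    rw [heq]
    show ∃ f', _ ∧ ferryA_scan dp i (some (dpg dp f), i - f) ((J : Int) + 1) = _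
    unfold ferryA_scan
    simp only
    by_cases hlt : PySem.List.pyGetD dp (i - ((J : Int) + 1)) 0 < dpg dp f
    · refine ⟨i - ((J : Int) + 1), ⟨by omega, by omega, ?_, ?_⟩, ?_⟩
      · intro k h1 h2
        by_cases hk : k = i - ((J : Int) + 1)
        · rw [hk]
        · have : i - (J : Int) ≤ k := by omega
          have := hb3 k (by omega) h2
          show dpg dp _ ≤ _
          change PySem.List.pyGetD dp (i - ((J : Int) + 1)) 0 ≤ _ at *
          omega
      · intro k h1 h2
        have := hb3 k (by omega) h2
        show dpg dp _ < _
        change PySem.List.pyGetD dp (i - ((J : Int) + 1)) 0 < _ at *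
        omega
      · rw [if_pos hlt]
        simp only [dpg, Prod.mk.injEq]
        exact ⟨trivial, by ring⟩
    · refine ⟨f, ⟨by omega, hb2, ?_, hb4⟩, ?_⟩
      · intro k h1 h2
        by_cases hk : k = i - ((J : Int) + 1)
        · rw [hk]
          unfold dpg at hlt ⊢
          omega
        · exact hb3 k (by omega) h2
      · rw [if_neg hlt]

-- ---- one lockstep iteration ----
lemma step_inv (schedule : List Int) (t n : Int) (hn : 1 ≤ n)
    (dp trips dq : List Int) (head : Nat) (i : Nat)
    (hlen : i + 1 < dp.length) (hhead : head ≤ dq.length)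
    (hinv : DqInv dp n (i : Int) (dq.drop head)) :
    ∃ dp' trips' dq' head',
      ferryA_step schedule t n (dp, trips) ((i : Int) + 1) = (dp', trips') ∧
      ferryB_step schedule t n (dp, trips, dq, head) ((i : Int) + 1) = (dp', trips', dq', head') ∧
      dp'.length = dp.length ∧ trips'.length = trips.length ∧
      head' ≤ dq'.length ∧ DqInv dp' n ((i : Int) + 1) (dq'.drop head') := by
  obtain ⟨hsort, hbnd, hchar⟩ := hinv
  have hi0 : (0 : Int) ≤ (i : Int) := Int.natCast_nonneg i
  set ii : Int := (i : Int) + 1 with hii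
  have hii1 : (1 : Int) ≤ ii := by omega
  set lo : Int := winLo n ii with hlo
  have hlo0 : (0 : Int) ≤ lo := winLo_nonneg n ii
  have hlopred : lo ≤ (i : Int) := by
    have := winLo_pred n ii hn hii1; omega
  have hloii : lo ≤ ii := by omega
  have hlomono : winLo n (i : Int) ≤ lo := winLo_mono n (i : Int) ii (by omega)
  have hwli : winLo n (i : Int) ≤ (i : Int) := winLo_le n (i : Int) hn hi0
  -- pop the stale front
  obtain ⟨hpf1, hpf2, hpf3⟩ := popFront_spec dq lo head hhead
  set head' := ferryB_popFront dq head lo with hhead'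
  set q : List Int := dq.drop head with hq
  set q1 : List Int := q.dropWhile (fun x => decide (x < lo)) with hq1
  have hq1sub : q1.Sublist q := List.dropWhile_sublist _
  have hq1sort : q1.Pairwise (· < ·) := hsort.sublist hq1sub
  have hmemq1 : ∀ k, k ∈ q1 ↔ k ∈ q ∧ lo ≤ k := mem_dropWhile_lt q hsort lo
  have hiq : (i : Int) ∈ q := by
    rw [hchar (i : Int) hwli (le_refl _)]
    intro k' h1 h2; omega
  have hiq1 : (i : Int) ∈ q1 := (hmemq1 _).mpr ⟨hiq, hlopred⟩
  have hq1ne : q1 ≠ [] := fun hcon => by rw [hcon] at hiq1; simp at hiq1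
  obtain ⟨c, rest, hq1eq⟩ := List.exists_cons_of_ne_nil hq1ne
  have hcq1 : c ∈ q1 := by rw [hq1eq]; exact List.mem_cons_self
  have hcq : c ∈ q := ((hmemq1 c).mp hcq1).1
  have hclo : lo ≤ c := ((hmemq1 c).mp hcq1).2
  obtain ⟨hcwl, hcle⟩ := hbnd c hcq
  have hkB : PySem.List.pyGetD dq ((head' : Nat) : Int) 0 = c := by
    rw [PySem.List.pyGetD_natCast]
    have hhd : dq[head']? = some c := by
      rw [← List.head?_drop, hpf3, hq1eq]; rfl
    rw [List.getD_eq_getElem?_getD, hhd]; rfl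
  -- A's scan
  have hJmin : (1 : Int) ≤ min n ii := le_min hn hii1
  set Jn : Nat := (min n ii).toNat with hJn
  have hJcast : (Jn : Int) = min n ii := Int.toNat_of_nonneg (by omega)
  have hJn1 : 1 ≤ Jn := by omega
  obtain ⟨f, ⟨hf1, hf2, hf3, hf4⟩, hfold⟩ := scan_spec dp ii Jn hJn1
  have hwin : ii - (Jn : Int) = lo := by
    rw [hJcast, hlo]; exact winLo_eq_sub_min n ii hn hii1
  rw [hwin] at hf1 hf3
  -- the deque front is exactly A's best index
  have hfq : f ∈ q := by
    rw [hchar f (by omega) (by omega)]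
    intro k' h1 h2
    exact hf4 k' h1 (by omega)
  have hfq1 : f ∈ q1 := (hmemq1 f).mpr ⟨hfq, by omega⟩
  have hc2 : ∀ k', c < k' → k' ≤ (i : Int) → dpg dp c < dpg dp k' :=
    (hchar c (by omega) hcle).mp hcq
  have hcf : c = f := by
    rcases List.mem_cons.mp (hq1eq ▸ hfq1) with h | h
    · exact h.symm
    · have hclt : c < f := (List.pairwise_cons.mp (hq1eq ▸ hq1sort)).1 f h
      have h1 := hf3 c (by omega) (by omega)
      have h2 := hc2 f hclt (by omega)
      omega
  -- names for the written values
  set sched : Int := PySem.List.pyGetD schedule (ii - 1) 0 with hsched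
  set v : Int := (if sched ≤ dpg dp f then dpg dp f else sched) + t with hv
  set dp' : List Int := PySem.List.pySetD dp ii v with hdp'
  set trips' : List Int := PySem.List.pySetD trips ii (PySem.List.pyGetD trips f 0 + 1) with htrips'
  have hiicast : ii = ((i + 1 : Nat) : Int) := by push_cast; ring
  have hlen' : dp'.length = dp.length := PySem.List.length_pySetD dp ii v
  have htlen' : trips'.length = trips.length := PySem.List.length_pySetD trips ii _
  have hset : ∀ k : Int, 0 ≤ k → k ≠ ii → dpg dp' k = dpg dp k := by
    intro k h0 hne
    rw [hdp', hiicast, dpg_set dp (i + 1) hlen v k h0, if_neg (by rw [← hiicast]; exact hne)]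
  have hsetself : dpg dp' ii = v := by
    rw [hdp', hiicast, dpg_set_self dp (i + 1) hlen v]
  -- A's step
  have hAstep : ferryA_step schedule t n (dp, trips) ii = (dp', trips') := by
    unfold ferryA_step
    simp only
    rw [show min n ii + 1 = (Jn : Int) + 1 by omega, hfold]
    simp only
    rw [show ii - (ii - f) = f by ring]
    rw [hdp', hv]
    by_cases hbr : sched ≤ dpg dp f
    · rw [if_pos hbr, if_pos hbr]
    · rw [if_neg hbr, if_neg hbr]
  -- B's step
  obtain ⟨hpb1, hpb2⟩ := popBack_spec dp' v dq head' hpf2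
  set dq2 : List Int := ferryB_popBack dp' dq head' v with hdq2
  have hBstep : ferryB_step schedule t n (dp, trips, dq, head) ii = (dp', trips', dq2 ++ [ii], head') := by
    unfold ferryB_step
    simp only
    rw [show (if ii - n > 0 then ii - n else 0) = lo from by rw [hlo]; rfl]
    rw [← hhead', hkB, hcf]
    rw [show PySem.List.pyGetD dp f 0 = dpg dp f from rfl]
    rw [← hsched, ← hv, ← hdp', ← htrips']
    rw [show PySem.List.pyGetD dp' ii 0 = v from hsetself, ← hdq2]
  -- the new active deque
  have hq2drop : dq2.drop head' = q1.rdropWhile (fun x => decide (v ≤ dpg dp' x)) := by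
    rw [hpb2, hpf3]
  set q2 : List Int := q1.rdropWhile (fun x => decide (v ≤ dpg dp' x)) with hq2
  have hq2pre : q2 <+: q1 := List.rdropWhile_prefix _ _
  have hq2sort : q2.Pairwise (· < ·) := hq1sort.sublist hq2pre.sublist
  have hq1bounds : ∀ k ∈ q1, 0 ≤ k ∧ k ≤ (i : Int) ∧ lo ≤ k := by
    intro k hk
    obtain ⟨hkq, hkl⟩ := (hmemq1 k).mp hk
    obtain ⟨h1, h2⟩ := hbnd k hkq
    exact ⟨by omega, h2, hkl⟩
  have hmono : ∀ a b, a ∈ q → b ∈ q → a < b → dpg dp a < dpg dp b := by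
    intro a b ha hb hab
    obtain ⟨ha1, ha2⟩ := hbnd a ha
    obtain ⟨hb1, hb2⟩ := hbnd b hb
    exact (hchar a ha1 ha2).mp ha b hab hb2
  have hup : ∀ a b, a ∈ q1 → b ∈ q1 → a < b →
      (fun x => decide (v ≤ dpg dp' x)) a = true → (fun x => decide (v ≤ dpg dp' x)) b = true := by
    intro a b ha hb hab hpa
    obtain ⟨ha0, ha1, _⟩ := hq1bounds a ha
    obtain ⟨hb0, hb1, _⟩ := hq1bounds b hb
    simp only [decide_eq_true_eq] at hpa ⊢
    rw [hset a ha0 (by omega)] at hpa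
    rw [hset b hb0 (by omega)]
    have := hmono a b ((hmemq1 a).mp ha).1 ((hmemq1 b).mp hb).1 hab
    omega
  have hmemq2 : ∀ k, k ∈ q2 ↔ k ∈ q1 ∧ dpg dp' k < v := by
    intro k
    rw [hq2, mem_rdropWhile_upclosed q1 _ hq1sort hup k]
    simp
  -- invariant for the next round
  refine ⟨dp', trips', dq2 ++ [ii], head', hAstep, hBstep, hlen', htlen', ?_, ?_, ?_, ?_⟩
  · rw [List.length_append]
    omega
  · rw [List.drop_append_of_le_length hpb1, hq2drop]
    refine List.pairwise_append.mpr ⟨hq2sort, List.pairwise_singleton _ _, ?_⟩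
    intro a ha b hb
    rw [List.mem_singleton.mp hb]
    have := hq1bounds a ((hmemq2 a).mp ha).1
    omega
  · rw [List.drop_append_of_le_length hpb1, hq2drop]
    intro k hk
    rcases List.mem_append.mp hk with hk | hk
    · have := hq1bounds k ((hmemq2 k).mp hk).1
      exact ⟨this.2.2, by omega⟩
    · rw [List.mem_singleton.mp hk]
      exact ⟨hloii, le_refl _⟩
  · rw [List.drop_append_of_le_length hpb1, hq2drop]
    intro k hk1 hk2
    constructor
    · intro hk
      rcases List.mem_append.mp hk with hk | hk
      · obtain ⟨hkq1, hkv⟩ := (hmemq2 k).mp hk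
        obtain ⟨hk0, hki, hklo⟩ := hq1bounds k hkq1
        intro k' h1 h2
        by_cases hk' : k' = ii
        · rw [hk', hsetself]; exact hkv
        · have hk'i : k' ≤ (i : Int) := by omega
          rw [hset k hk0 (by omega), hset k' (by omega) hk']
          exact (hchar k (by omega) hki).mp ((hmemq1 k).mp hkq1).1 k' h1 hk'i
      · rw [List.mem_singleton.mp hk]
        intro k' h1 h2; omega
    · intro hall
      by_cases hkii : k = ii
      · exact List.mem_append.mpr (Or.inr (by rw [hkii]; exact List.mem_singleton_self _))
      · have hki : k ≤ (i : Int) := by omega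
        refine List.mem_append.mpr (Or.inl ((hmemq2 k).mpr ⟨?_, ?_⟩))
        · refine (hmemq1 k).mpr ⟨?_, hk1⟩
          rw [hchar k (by omega) hki]
          intro k' h1 h2
          have := hall k' h1 (by omega)
          rw [hset k (by omega) hkii, hset k' (by omega) (by omega)] at this
          exact this
        · have := hall ii (by omega) (le_refl _)
          rw [hsetself] at this
          exact this

-- ---- the lockstep invariant over the whole loop ----
lemma lockstep (schedule : List Int) (t n : Int) (hn : 1 ≤ n) (M : Nat) :
    ∀ i : Nat, i ≤ M →
      ∃ dp trips dq head,
        (PySem.List.pyRange 1 ((i : Int) + 1) 1).foldl (ferryA_step schedule t n)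
            (List.replicate (M + 1) (0 : Int), List.replicate (M + 1) (0 : Int)) = (dp, trips) ∧
        (PySem.List.pyRange 1 ((i : Int) + 1) 1).foldl (ferryB_step schedule t n)
            (List.replicate (M + 1) (0 : Int), List.replicate (M + 1) (0 : Int), [0], 0) =
          (dp, trips, dq, head) ∧
        dp.length = M + 1 ∧ trips.length = M + 1 ∧
        head ≤ dq.length ∧ DqInv dp n (i : Int) (dq.drop head) := by
  intro i
  induction i with
  | zero =>
    intro _
    refine ⟨List.replicate (M + 1) 0, List.replicate (M + 1) 0, [0], 0, ?_, ?_, by simp, by simp,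
      by simp, ?_, ?_, ?_⟩
    · simp only [Nat.cast_zero, zero_add]
      rw [PySem.List.pyRange_one_eq_nil (le_refl 1)]
      rfl
    · simp only [Nat.cast_zero, zero_add]
      rw [PySem.List.pyRange_one_eq_nil (le_refl 1)]
      rfl
    · simp
    · intro k hk
      have h1 := winLo_nonneg n 0
      have h2 := winLo_le n 0 hn (le_refl 0)
      simp only [List.drop_zero, List.mem_singleton] at hk
      subst hk
      simp only [Nat.cast_zero]
      omega
    · intro k hk1 hk2
      have h1 := winLo_nonneg n 0
      simp only [Nat.cast_zero] at hk1 hk2 ⊢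
      have hk : k = 0 := by omega
      subst hk
      simp only [List.drop_zero, List.mem_singleton]
      constructor
      · intro _ k' h1' h2'; omega
      · intro _; trivial
  | succ i ih =>
    intro hi1
    obtain ⟨dp, trips, dq, head, hA, hB, hdl, htl, hh, hinv⟩ := ih (by omega)
    obtain ⟨dp', trips', dq', head', hsA, hsB, h1, h2, h3, h4⟩ :=
      step_inv schedule t n hn dp trips dq head i (by rw [hdl]; omega) hh hinv
    have hcast : ((i + 1 : Nat) : Int) + 1 = ((i : Int) + 1) + 1 := by push_cast; ring
    refine ⟨dp', trips', dq', head', ?_, ?_, by omega, by omega, h3, ?_⟩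
    · rw [hcast, PySem.List.pyRange_one_succ_right (by omega), List.foldl_append, hA]
      simp only [List.foldl_cons, List.foldl_nil]
      exact hsA
    · rw [hcast, PySem.List.pyRange_one_succ_right (by omega), List.foldl_append, hB]
      simp only [List.foldl_cons, List.foldl_nil]
      exact hsB
    · have : ((i + 1 : Nat) : Int) = (i : Int) + 1 := by push_cast; ring
      rw [this]
      exact h4

-- initialisations of the two ports coincide
lemma initA_eq (M : Nat) :
    PySem.List.pySetD (ferryA_zeros (M : Int)) 0 0 = List.replicate (M + 1) (0 : Int) := by
  rw [ferryA_zeros_eq, show (0 : Int) = ((0 : Nat) : Int) by norm_num,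
    PySem.List.pySetD_natCast, List.replicate_succ]
  rfl

theorem ferry_boat_spec : Claim_equal_ferry_boat := by
  unfold Claim_equal_ferry_boat
  intro schedule m t n hdom hpre
  obtain ⟨hm0, himp⟩ := hpre
  unfold Spec_ferry_boat
  rcases eq_or_lt_of_le hm0 with hm | hm
  · -- m = 0: the loop body never runs
    rw [← hm]
    unfold ferry_boat ferry_boat_alt
    simp only
    rw [PySem.List.pyRange_one_eq_nil (by norm_num)]
    simp only [List.foldl_nil]
    decide
  · -- 1 ≤ m
    obtain ⟨hn, _⟩ := himp (by omega)
    set M := m.toNat with hM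
    have hm' : m = (M : Int) := by omega
    obtain ⟨dp, trips, dq, head, hA, hB, _, _, _, _⟩ :=
      lockstep schedule t n hn M M (le_refl M)
    unfold ferry_boat ferry_boat_alt
    simp only
    rw [hm', initA_eq M, show (((M : Int) + 1)).toNat = M + 1 by omega, hA, hB]
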